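-- pv_equiv track=rewrite | github.com/thedesiproject/ai | framework/json-minify.py | generate_keymap_optimized
-- ===== SOURCE A (Python) =====
-- from typing import Any, Dict, List, Optional, Set
--
-- def generate_keymap_optimized(all_keys: Set[str]) -> Dict[str, str]:
--   """Generate optimal abbreviation keymap from full key set."""
--   sorted_keys = sorted(all_keys, key=len)
--   keymap, used = {}, set()
--   for key in sorted_keys:
--     assigned = False
--     if key and key[0] not in used:
--       keymap[key[0]] = key
--       used.add(key[0])
--       assigned = True
--     if not assigned:
--       for i in range(1, 1000):
--         cand = f"{key[0]}{i}"
--         if cand not in used: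
--           keymap[cand] = key
--           used.add(cand)
--           assigned = True
--           break
--     if not assigned:
--       for length in range(2, len(key) + 1):
--         prefix = key[:length]
--         if prefix not in used:
--           keymap[prefix] = key
--           used.add(prefix)
--           assigned = True
--           break
--     if not assigned and key not in used:
--       keymap[key] = key
--       used.add(key)
--   return keymap
-- ===== SOURCE B (Python) =====
-- def generate_keymap_optimized(all_keys):
--     """Generate optimal abbreviation keymap from full key set."""
--     # Keys whose first characters differ can never compete for an abbreviation
--     # (every candidate an original key ever tries starts with its own first
--     # character), so keep one independent state per first character: the next
--     # free numeric suffix and, for the rare exhausted case, the local used set.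
--     out = {}
--     groups = {}  # first char -> [next numeric index, local used set]
--     for key in sorted(all_keys, key=len):
--         c = key[0]
--         if c not in groups:
--             cand = c
--             groups[c] = [1, {c}]
--         else:
--             n, lu = groups[c]
--             if n < 1000:
--                 cand = f"{c}{n}"
--                 groups[c][0] = n + 1
--                 lu.add(cand)
--             else:
--                 # numeric suffixes exhausted: first unused prefix, else the key
--                 cand = next((key[:l] for l in range(2, len(key) + 1)
--                              if key[:l] not in lu), key)
--                 if cand in lu:
--                     continue  # everything taken: nothing to assign
--                 lu.add(cand)
--         out[cand] = key
--     return out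
-- ===== Notes on version B (the rewrite author's own statement) =====
-- stated objective: faster
-- what changed: A's single global used-set with a four-stage first-unused candidate scan per key is replaced by independent per-first-character states (a next-numeric-suffix counter plus a local used set), valid because every candidate a key ever tries starts with that key's first character; the counter makes the numeric-suffix choice O(1) instead of A's O(k) scan over already-used suffixes.
-- outside the precondition, e.g. on generate_keymap_optimized({'ab', 'ac'}): A returns {'a': 'ac', 'a1': 'ab'}, B returns {'a': 'ac', 'a1': 'ab'}
import Mathlib
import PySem

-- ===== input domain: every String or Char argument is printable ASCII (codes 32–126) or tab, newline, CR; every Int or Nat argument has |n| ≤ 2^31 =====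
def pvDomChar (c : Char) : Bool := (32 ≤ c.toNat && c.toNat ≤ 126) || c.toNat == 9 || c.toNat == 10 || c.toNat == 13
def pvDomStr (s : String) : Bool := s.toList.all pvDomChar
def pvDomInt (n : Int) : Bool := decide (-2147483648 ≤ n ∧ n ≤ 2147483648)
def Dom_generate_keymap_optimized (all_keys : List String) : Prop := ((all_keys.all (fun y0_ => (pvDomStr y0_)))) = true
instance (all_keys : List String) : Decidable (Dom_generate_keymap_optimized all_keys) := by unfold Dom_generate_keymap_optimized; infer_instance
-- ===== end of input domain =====

-- B replaces A's one global used-set and per-key four-stage scan by independent per-first-character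
-- states (a next-numeric-suffix counter plus a local used set), exploiting that candidates of keys
-- with different first characters never collide; the counter replaces A's numeric-suffix scan
-- (objective: faster, measured).

-- ===== PORT A =====
-- inner 'for i in range(1, 1000): … break' — the candidate it breaks on, none if exhausted
def pvGkoNumLoop (c0 : String) (used : PySem.Set String) : List Int → Option String
  | [] => none
  | i :: rest =>
    let cand := c0 ++ PySem.Int.toStr i
    if PySem.Set.contains used cand then pvGkoNumLoop c0 used rest else some cand

-- 'for length in range(2, len(key) + 1): … break' (A) = 'next((key[:l] … if key[:l] not in lu), …)' (B):
-- both Pythons scan prefixes the same way, against their own set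
def pvGkoPrefLoop (key : String) (u : PySem.Set String) : List Int → Option String
  | [] => none
  | l :: rest =>
    let pre := PySem.Str.slice key none (some l)
    if PySem.Set.contains u pre then pvGkoPrefLoop key u rest else some pre

-- one iteration of A's main loop over the global (keymap, used)
def pvGkoStepA (st : PySem.Dict String String × PySem.Set String) (key : String) :
    PySem.Dict String String × PySem.Set String :=
  match PySem.Str.pyGet? key 0 with
  | none => st  -- key == "": Python raises IndexError at key[0]; excluded by Pre_
  | some ch =>
    let c0 := String.ofList [ch]
    if PySem.Set.contains st.2 c0 then
      match pvGkoNumLoop c0 st.2 (PySem.List.pyRange 1 1000) with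
      | some cand => (PySem.Dict.insert st.1 cand key, PySem.Set.add st.2 cand)
      | none =>
        match pvGkoPrefLoop key st.2 (PySem.List.pyRange 2 (PySem.Str.len key + 1)) with
        | some pre => (PySem.Dict.insert st.1 pre key, PySem.Set.add st.2 pre)
        | none =>
          if PySem.Set.contains st.2 key then st
          else (PySem.Dict.insert st.1 key key, PySem.Set.add st.2 key)
    else (PySem.Dict.insert st.1 c0 key, PySem.Set.add st.2 c0)

def generate_keymap_optimized (all_keys : List String) : List (String × String) :=
  PySem.Dict.items
    (((PySem.List.sorted all_keys (fun k => PySem.Str.len k) false).foldl pvGkoStepA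
      (PySem.Dict.empty, PySem.Set.empty)).1)

-- ===== PORT B =====
-- one iteration of B's loop over (out, groups): per first character a next numeric suffix n and a
-- local used set lu; no global used set
def pvGkoStepB (st : PySem.Dict String String × PySem.Dict Char (Int × PySem.Set String))
    (key : String) : PySem.Dict String String × PySem.Dict Char (Int × PySem.Set String) :=
  match PySem.Str.pyGet? key 0 with
  | none => st  -- key == "": Python raises IndexError at key[0]; excluded by Pre_
  | some ch =>
    match PySem.Dict.get? st.2 ch with
    | none =>
      let c0 := String.ofList [ch]
      (PySem.Dict.insert st.1 c0 key,
       PySem.Dict.insert st.2 ch (1, PySem.Set.add PySem.Set.empty c0))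
    | some (n, lu) =>
      if n < 1000 then
        let cand := String.ofList [ch] ++ PySem.Int.toStr n
        (PySem.Dict.insert st.1 cand key,
         PySem.Dict.insert st.2 ch (n + 1, PySem.Set.add lu cand))
      else
        match pvGkoPrefLoop key lu (PySem.List.pyRange 2 (PySem.Str.len key + 1)) with
        | some pre =>
          (PySem.Dict.insert st.1 pre key, PySem.Dict.insert st.2 ch (n, PySem.Set.add lu pre))
        | none =>
          if PySem.Set.contains lu key then st
          else (PySem.Dict.insert st.1 key key,
                PySem.Dict.insert st.2 ch (n, PySem.Set.add lu key))

def generate_keymap_optimized_alt (all_keys : List String) : List (String × String) :=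
  PySem.Dict.items
    (((PySem.List.sorted all_keys (fun k => PySem.Str.len k) false).foldl pvGkoStepB
      (PySem.Dict.empty, PySem.Dict.empty)).1)

-- ===== PRECONDITION & SPEC =====
-- Pre_ excludes inputs containing the empty string, on which both Pythons raise IndexError (key[0]),
-- and inputs holding two equal-length keys with the same first character (in particular duplicates):
-- the caller passes a set, so on such ties sorted()'s order — and hence which key gets which
-- abbreviation — depends on Python's unmodelled set iteration order, and no single value is right.
def Pre_generate_keymap_optimized (all_keys : List String) : Prop :=
  "" ∉ all_keys ∧
    List.Pairwise (fun k1 k2 => PySem.Str.len k1 ≠ PySem.Str.len k2 ∨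
      k1.toList.head? ≠ k2.toList.head?) all_keys
instance (all_keys : List String) : Decidable (Pre_generate_keymap_optimized all_keys) := by
  unfold Pre_generate_keymap_optimized; infer_instance

def pvWitness_generate_keymap_optimized : List String := ["cat", "dog", "c", "d"]

def Spec_generate_keymap_optimized (all_keys : List String) (out : List (String × String)) : Prop :=
  out = generate_keymap_optimized_alt all_keys
instance (all_keys : List String) (out : List (String × String)) :
    Decidable (Spec_generate_keymap_optimized all_keys out) := by
  unfold Spec_generate_keymap_optimized; infer_instance

-- ===== CLAIM (what is proved, stated in full; the proofs are below) =====
def Claim_equal_generate_keymap_optimized : Prop :=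
  ∀ (all_keys : List String), Dom_generate_keymap_optimized all_keys →
    Pre_generate_keymap_optimized all_keys →
      Spec_generate_keymap_optimized all_keys (generate_keymap_optimized all_keys)

-- ===== LEMMAS AND PROOFS =====

-- ---- decimal-numeral facts: Nat.toDigits 10 is injective on positives ----

theorem pvToDigitsCore_eq (f : ℕ) : ∀ (n : ℕ) (acc : List Char), 0 < n → n < f →
    Nat.toDigitsCore 10 f n acc = ((Nat.digits 10 n).map Nat.digitChar).reverse ++ acc := by
  induction f with
  | zero => intro n acc hn hf; omega
  | succ f ih =>
    intro n acc hn hf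
    rw [Nat.toDigitsCore]
    by_cases h : n / 10 = 0
    · have hlt : n < 10 := by omega
      rw [if_pos h, Nat.digits_def' (by norm_num) hn, h, Nat.digits_zero]
      simp [Nat.mod_eq_of_lt hlt]
    · rw [if_neg h]
      have h1 : 0 < n / 10 := Nat.pos_of_ne_zero h
      have h2 : n / 10 < f := by
        have := Nat.div_lt_self hn (by norm_num : 1 < 10)
        omega
      rw [ih (n / 10) _ h1 h2, Nat.digits_def' (by norm_num) hn]
      simp

theorem pvToDigits_pos (n : ℕ) (hn : 0 < n) :
    Nat.toDigits 10 n = ((Nat.digits 10 n).map Nat.digitChar).reverse := by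
  rw [Nat.toDigits, pvToDigitsCore_eq (n + 1) n [] hn (by omega)]
  simp

theorem pvDigitChar_inj_fin : ∀ a b : Fin 10, Nat.digitChar a = Nat.digitChar b → a = b := by
  decide

theorem pvMapDigitChar_inj : ∀ (l1 l2 : List ℕ), (∀ x ∈ l1, x < 10) → (∀ x ∈ l2, x < 10) →
    l1.map Nat.digitChar = l2.map Nat.digitChar → l1 = l2 := by
  intro l1
  induction l1 with
  | nil => intro l2 _ _ h; cases l2 <;> simp_all
  | cons a t ih =>
    intro l2 h1 h2 h
    cases l2 with
    | nil => simp at h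
    | cons b t2 =>
      simp only [List.map_cons, List.cons.injEq] at h
      have hab : a = b := by
        have := pvDigitChar_inj_fin ⟨a, h1 a (by simp)⟩ ⟨b, h2 b (by simp)⟩ h.1
        simpa [Fin.mk.injEq] using this
      have := ih t2 (fun x hx => h1 x (by simp [hx])) (fun x hx => h2 x (by simp [hx])) h.2
      simp [hab, this]

theorem pvToDigits_inj {m n : ℕ} (hm : 0 < m) (hn : 0 < n)
    (h : Nat.toDigits 10 m = Nat.toDigits 10 n) : m = n := by
  rw [pvToDigits_pos m hm, pvToDigits_pos n hn] at h
  have h2 := List.reverse_injective h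
  have h3 := pvMapDigitChar_inj _ _
    (fun x hx => Nat.digits_lt_base (by norm_num) hx)
    (fun x hx => Nat.digits_lt_base (by norm_num) hx) h2
  calc m = Nat.ofDigits 10 (Nat.digits 10 m) := (Nat.ofDigits_digits 10 m).symm
    _ = Nat.ofDigits 10 (Nat.digits 10 n) := by rw [h3]
    _ = n := Nat.ofDigits_digits 10 n

-- ---- str(i) facts for positive i ----

theorem pvToChars_pos (i : Int) (hi : 1 ≤ i) :
    PySem.Int.toChars i = Nat.toDigits 10 i.toNat := by
  unfold PySem.Int.toChars
  rw [if_neg (by omega)]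

theorem pvToStr_inj {a b : Int} (ha : 1 ≤ a) (hb : 1 ≤ b)
    (h : PySem.Int.toStr a = PySem.Int.toStr b) : a = b := by
  have h1 : (PySem.Int.toStr a).toList = (PySem.Int.toStr b).toList := by rw [h]
  rw [PySem.Int.toList_toStr, PySem.Int.toList_toStr, pvToChars_pos a ha, pvToChars_pos b hb] at h1
  have := pvToDigits_inj (m := a.toNat) (n := b.toNat) (by omega) (by omega) h1
  omega

theorem pvToStr_ne_nil (i : Int) (hi : 1 ≤ i) : (PySem.Int.toStr i).toList ≠ [] := by
  rw [PySem.Int.toList_toStr, pvToChars_pos i hi]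
  intro h
  have := @Nat.length_toDigits_pos 10 i.toNat
  rw [h] at this
  simp at this

-- ---- candidate-string shape facts ----

theorem pvCand_head (c : Char) (s : String) :
    (String.ofList [c] ++ s).toList.head? = some c := by
  simp [String.toList_append, String.toList_ofList]

theorem pvC0_head (c : Char) : (String.ofList [c]).toList.head? = some c := by
  simp [String.toList_ofList]

theorem pvCand_ne_c0 (c : Char) (i : Int) (hi : 1 ≤ i) :
    String.ofList [c] ++ PySem.Int.toStr i ≠ String.ofList [c] := by
  intro h
  have := congrArg String.toList h
  simp only [String.toList_append, String.toList_ofList] at this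
  exact pvToStr_ne_nil i hi (by simpa using this)

theorem pvCand_inj (c : Char) {i j : Int} (hi : 1 ≤ i) (hj : 1 ≤ j)
    (h : String.ofList [c] ++ PySem.Int.toStr i = String.ofList [c] ++ PySem.Int.toStr j) :
    i = j := by
  have := congrArg String.toList h
  simp only [String.toList_append, String.toList_ofList, List.cons_append, List.nil_append,
    List.cons.injEq] at this
  exact pvToStr_inj hi hj (String.toList_inj.mp this.2)

-- ---- the simulation invariant between A's global used set and B's per-character states ----

def pvInvM (used : PySem.Set String) (groups : PySem.Dict Char (Int × PySem.Set String)) : Prop :=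
  ∀ s : String, s ∈ used ↔ ∃ c n lu, PySem.Dict.get? groups c = some (n, lu) ∧
    s.toList.head? = some c ∧ s ∈ lu

def pvInvC (groups : PySem.Dict Char (Int × PySem.Set String)) : Prop :=
  ∀ c n lu, PySem.Dict.get? groups c = some (n, lu) →
    1 ≤ n ∧ n ≤ 1000 ∧ String.ofList [c] ∈ lu ∧
    (∀ i : Int, 1 ≤ i → i < n → String.ofList [c] ++ PySem.Int.toStr i ∈ lu) ∧
    (∀ i : Int, n ≤ i → i ≤ 999 → String.ofList [c] ++ PySem.Int.toStr i ∉ lu)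

theorem pvContainsAgree {used : PySem.Set String} {groups : PySem.Dict Char (Int × PySem.Set String)}
    (hM : pvInvM used groups) {c : Char} {n : Int} {lu : PySem.Set String}
    (hg : PySem.Dict.get? groups c = some (n, lu)) {s : String}
    (hs : s.toList.head? = some c) :
    PySem.Set.contains used s = PySem.Set.contains lu s := by
  have hiff : s ∈ used ↔ s ∈ lu := by
    constructor
    · intro h
      obtain ⟨c', n', lu', hg', hs', hm'⟩ := (hM s).mp h
      rw [hs] at hs'
      obtain rfl := Option.some.inj hs'
      rw [hg] at hg'
      obtain ⟨rfl, rfl⟩ := Prod.mk.injEq .. ▸ (Option.some.inj hg')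
      exact hm'
    · intro h
      exact (hM s).mpr ⟨c, n, lu, hg, hs, h⟩
  rw [PySem.Set.contains_eq_decide, PySem.Set.contains_eq_decide]
  simp [hiff]

-- A's numeric scan returns exactly the counter's candidate
theorem pvNumLoop_finds (c0 : String) (used : PySem.Set String) (n : Int) :
    ∀ (k : ℕ) (a : Int), (n - a).toNat = k → 1 ≤ a → a ≤ n → n < 1000 →
    (∀ i : Int, a ≤ i → i < n → PySem.Set.contains used (c0 ++ PySem.Int.toStr i) = true) →
    PySem.Set.contains used (c0 ++ PySem.Int.toStr n) = false →
    pvGkoNumLoop c0 used (PySem.List.pyRange a 1000) = some (c0 ++ PySem.Int.toStr n) := by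
  intro k
  induction k with
  | zero =>
    intro a hk h1 h2 h3 hall hnone
    have : a = n := by omega
    subst this
    rw [PySem.List.pyRange_one_cons (by omega)]
    simp only [pvGkoNumLoop, hnone, Bool.false_eq_true, if_false]
  | succ k ih =>
    intro a hk h1 h2 h3 hall hnone
    have hlt : a < n := by omega
    rw [PySem.List.pyRange_one_cons (by omega)]
    simp only [pvGkoNumLoop, hall a le_rfl hlt, if_true]
    exact ih (a + 1) (by omega) (by omega) (by omega) h3
      (fun i hi1 hi2 => hall i (by omega) hi2) hnone

-- A's numeric scan exhausts when every numeric suffix is used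
theorem pvNumLoop_none (c0 : String) (used : PySem.Set String) :
    ∀ (k : ℕ) (a : Int), (1000 - a).toNat = k → 1 ≤ a →
    (∀ i : Int, a ≤ i → i < 1000 → PySem.Set.contains used (c0 ++ PySem.Int.toStr i) = true) →
    pvGkoNumLoop c0 used (PySem.List.pyRange a 1000) = none := by
  intro k
  induction k with
  | zero =>
    intro a hk _ _
    rw [PySem.List.pyRange_one_eq_nil (by omega)]
    rfl
  | succ k ih =>
    intro a hk h1 hall
    rw [PySem.List.pyRange_one_cons (by omega)]
    simp only [pvGkoNumLoop, hall a le_rfl (by omega : a < 1000), if_true]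
    exact ih (a + 1) (by omega) (by omega) (fun i hi1 hi2 => hall i (by omega) hi2)

-- a prefix key[:l] with l ≥ 2 keeps the key's first character
theorem pvSliceHead {key : String} {c : Char} (hk : key.toList.head? = some c)
    {l : Int} (hl : 2 ≤ l) :
    (PySem.Str.slice key none (some l)).toList.head? = some c := by
  rw [PySem.Str.toList_slice, PySem.Chars.slice_eq_listSlice,
    PySem.List.slice_to key.toList (by omega : (0:Int) ≤ l)]
  obtain ⟨x, xs, hxl⟩ : ∃ x xs, key.toList = x :: xs := by
    cases h : key.toList with
    | nil => rw [h] at hk; simp at hk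
    | cons x xs => exact ⟨x, xs, rfl⟩
  rw [hxl] at hk ⊢
  rw [show l.toNat = (l.toNat - 1) + 1 by omega, List.take_succ_cons]
  simpa using hk

-- both Pythons' prefix scans agree when the two sets agree on strings with the key's first char
theorem pvPrefLoop_congr {key : String} {u1 u2 : PySem.Set String} {c : Char}
    (hk : key.toList.head? = some c)
    (h : ∀ p : String, p.toList.head? = some c →
      PySem.Set.contains u1 p = PySem.Set.contains u2 p) :
    ∀ l : List Int, (∀ i ∈ l, 2 ≤ i) → pvGkoPrefLoop key u1 l = pvGkoPrefLoop key u2 l := by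
  intro l
  induction l with
  | nil => intro _; rfl
  | cons i rest ih =>
    intro hall
    simp only [pvGkoPrefLoop]
    rw [h _ (pvSliceHead hk (hall i (by simp)))]
    cases PySem.Set.contains u2 (PySem.Str.slice key none (some i)) with
    | false => rfl
    | true => simpa using ih (fun j hj => hall j (by simp [hj]))

-- a successful prefix scan returns a string with the key's first character
theorem pvPrefLoop_head {key : String} {u : PySem.Set String} {c : Char}
    (hk : key.toList.head? = some c) :
    ∀ l : List Int, (∀ i ∈ l, 2 ≤ i) → ∀ {pre : String},
      pvGkoPrefLoop key u l = some pre → pre.toList.head? = some c := by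
  intro l
  induction l with
  | nil => intro _ pre h; simp [pvGkoPrefLoop] at h
  | cons i rest ih =>
    intro hall pre h
    simp only [pvGkoPrefLoop] at h
    by_cases hc : PySem.Set.contains u (PySem.Str.slice key none (some i)) = true
    · rw [if_pos hc] at h
      exact ih (fun j hj => hall j (by simp [hj])) h
    · rw [if_neg hc] at h
      obtain rfl := Option.some.inj h
      exact pvSliceHead hk (hall i (by simp))

-- adding one string with first char c to A's used and to c's local set preserves pvInvM
theorem pvInvM_add {used : PySem.Set String} {groups : PySem.Dict Char (Int × PySem.Set String)}
    (hM : pvInvM used groups) (c : Char) (s0 : String) (hh : s0.toList.head? = some c)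
    (n' : Int) (lu' : PySem.Set String)
    (hlu' : ∀ s : String, s ∈ lu' ↔
      ((∃ n lu, PySem.Dict.get? groups c = some (n, lu) ∧ s ∈ lu) ∨ s = s0)) :
    pvInvM (PySem.Set.add used s0) (PySem.Dict.insert groups c (n', lu')) := by
  intro s
  rw [PySem.Set.mem_add]
  constructor
  · intro h
    rcases h with h | rfl
    · obtain ⟨c1, n1, lu1, hg1, hs1, hm1⟩ := (hM s).mp h
      by_cases hc : c1 = c
      · subst hc
        exact ⟨c1, n', lu', PySem.Dict.get?_insert_self .., hs1,
          (hlu' s).mpr (Or.inl ⟨n1, lu1, hg1, hm1⟩)⟩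
      · exact ⟨c1, n1, lu1, by rw [PySem.Dict.get?_insert_of_ne _ _ hc]; exact hg1, hs1, hm1⟩
    · exact ⟨c, n', lu', PySem.Dict.get?_insert_self .., hh, (hlu' _).mpr (Or.inr rfl)⟩
  · rintro ⟨c1, n1, lu1, hg1, hs1, hm1⟩
    by_cases hc : c1 = c
    · subst hc
      rw [PySem.Dict.get?_insert_self] at hg1
      obtain ⟨rfl, rfl⟩ := Prod.mk.injEq .. ▸ (Option.some.inj hg1)
      rcases (hlu' s).mp hm1 with ⟨n2, lu2, hg2, hm2⟩ | rfl
      · exact Or.inl ((hM s).mpr ⟨c1, n2, lu2, hg2, hs1, hm2⟩)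
      · exact Or.inr rfl
    · rw [PySem.Dict.get?_insert_of_ne _ _ hc] at hg1
      exact Or.inl ((hM s).mpr ⟨c1, n1, lu1, hg1, hs1, hm1⟩)

-- one iteration of A and of B from related states: same keymap, still related
set_option maxRecDepth 8192 in
theorem pvStep_sim (km : PySem.Dict String String) (used : PySem.Set String)
    (groups : PySem.Dict Char (Int × PySem.Set String)) (key : String)
    (hM : pvInvM used groups) (hC : pvInvC groups) :
    (pvGkoStepA (km, used) key).1 = (pvGkoStepB (km, groups) key).1 ∧
      pvInvM (pvGkoStepA (km, used) key).2 (pvGkoStepB (km, groups) key).2 ∧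
      pvInvC (pvGkoStepB (km, groups) key).2 := by
  cases hget : PySem.Str.pyGet? key 0 with
  | none =>
    have e1 : pvGkoStepA (km, used) key = (km, used) := by unfold pvGkoStepA; rw [hget]
    have e2 : pvGkoStepB (km, groups) key = (km, groups) := by unfold pvGkoStepB; rw [hget]
    rw [e1, e2]
    exact ⟨rfl, hM, hC⟩
  | some ch =>
    have hkey : key.toList.head? = some ch := by
      have h0 : PySem.List.pyGet? key.toList 0 = key.toList[(0:Nat)]? := by
        simpa using PySem.Str.pyGet?_natCast key 0
      have h1 : PySem.List.pyGet? key.toList 0 = some ch := by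
        rw [← hget]; simp [pysem]
      rw [List.head?_eq_getElem?, ← h0, h1]
    cases hgrp : PySem.Dict.get? groups ch with
    | none =>
      have hc0 : PySem.Set.contains used (String.ofList [ch]) = false := by
        rw [PySem.Set.contains_eq_decide, decide_eq_false_iff_not]
        intro hmem
        obtain ⟨c1, n1, lu1, hg1, hs1, _⟩ := (hM _).mp hmem
        rw [pvC0_head] at hs1
        obtain rfl := Option.some.inj hs1
        rw [hgrp] at hg1
        cases hg1
      refine ⟨?_, ?_, ?_⟩
      · simp only [pvGkoStepA, pvGkoStepB, hget, hgrp, hc0, Bool.false_eq_true, if_false]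
      · simp only [pvGkoStepA, pvGkoStepB, hget, hgrp, hc0, Bool.false_eq_true, if_false]
        refine pvInvM_add hM ch _ (pvC0_head ch) 1 _ (fun s => ?_)
        rw [PySem.Set.mem_add]
        simp [hgrp, PySem.Set.empty]
      · simp only [pvGkoStepB, hget, hgrp]
        intro c1 n1 lu1 hg1
        by_cases hc : c1 = ch
        · subst hc
          rw [PySem.Dict.get?_insert_self] at hg1
          obtain ⟨rfl, rfl⟩ := Prod.mk.injEq .. ▸ (Option.some.inj hg1)
          refine ⟨by omega, by omega, ?_, ?_, ?_⟩
          · rw [PySem.Set.mem_add]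
            exact Or.inr rfl
          · intro i h1 h2; omega
          · intro i h1 h2
            rw [PySem.Set.mem_add]
            rintro (h | h)
            · simp [PySem.Set.empty] at h
            · exact pvCand_ne_c0 c1 i h1 h
        · rw [PySem.Dict.get?_insert_of_ne _ _ hc] at hg1
          exact hC c1 n1 lu1 hg1
    | some nlu =>
      obtain ⟨n, lu⟩ := nlu
      obtain ⟨hn1, hn2, hc0lu, hpos, hneg⟩ := hC ch n lu hgrp
      have hc0used : PySem.Set.contains used (String.ofList [ch]) = true := by
        rw [PySem.Set.contains_eq_decide, decide_eq_true_iff]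
        exact (hM _).mpr ⟨ch, n, lu, hgrp, pvC0_head ch, hc0lu⟩
      by_cases hlt : n < 1000
      · have hfind : pvGkoNumLoop (String.ofList [ch]) used (PySem.List.pyRange 1 1000)
            = some (String.ofList [ch] ++ PySem.Int.toStr n) := by
          refine pvNumLoop_finds _ _ n (n - 1).toNat 1 (by omega) le_rfl hn1 hlt ?_ ?_
          · intro i h1 h2
            rw [PySem.Set.contains_eq_decide, decide_eq_true_iff]
            exact (hM _).mpr ⟨ch, n, lu, hgrp, pvCand_head ch _, hpos i h1 h2⟩
          · rw [PySem.Set.contains_eq_decide, decide_eq_false_iff_not]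
            intro hmem
            obtain ⟨c1, n1, lu1, hg1, hs1, hm1⟩ := (hM _).mp hmem
            rw [pvCand_head] at hs1
            obtain rfl := Option.some.inj hs1
            rw [hgrp] at hg1
            obtain ⟨rfl, rfl⟩ := Prod.mk.injEq .. ▸ (Option.some.inj hg1)
            exact hneg n le_rfl (by omega) hm1
        refine ⟨?_, ?_, ?_⟩
        · simp only [pvGkoStepA, pvGkoStepB, hget, hgrp, hc0used, if_true, hfind, hlt]
        · simp only [pvGkoStepA, pvGkoStepB, hget, hgrp, hc0used, if_true, hfind, hlt]
          refine pvInvM_add hM ch _ (pvCand_head ch _) (n + 1) _ (fun s => ?_)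
          rw [PySem.Set.mem_add]
          simp [hgrp]
        · simp only [pvGkoStepB, hget, hgrp, hlt, if_true]
          intro c1 n1 lu1 hg1
          by_cases hc : c1 = ch
          · subst hc
            rw [PySem.Dict.get?_insert_self] at hg1
            obtain ⟨rfl, rfl⟩ := Prod.mk.injEq .. ▸ (Option.some.inj hg1)
            refine ⟨by omega, by omega, ?_, ?_, ?_⟩
            · rw [PySem.Set.mem_add]
              exact Or.inl hc0lu
            · intro i h1 h2
              rw [PySem.Set.mem_add]
              by_cases hin : i < n
              · exact Or.inl (hpos i h1 hin)
              · right
                have : i = n := by omega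
                rw [this]
            · intro i h1 h2
              rw [PySem.Set.mem_add]
              rintro (h | h)
              · exact hneg i (by omega) h2 h
              · exact absurd (pvCand_inj c1 (by omega) (by omega) h) (by omega)
          · rw [PySem.Dict.get?_insert_of_ne _ _ hc] at hg1
            exact hC c1 n1 lu1 hg1
      · have hnone : pvGkoNumLoop (String.ofList [ch]) used (PySem.List.pyRange 1 1000) = none := by
          refine pvNumLoop_none _ _ 999 1 (by omega) le_rfl (fun i h1 h2 => ?_)
          rw [PySem.Set.contains_eq_decide, decide_eq_true_iff]
          exact (hM _).mpr ⟨ch, n, lu, hgrp, pvCand_head ch _, hpos i h1 (by omega)⟩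
        have hagree : ∀ p : String, p.toList.head? = some ch →
            PySem.Set.contains used p = PySem.Set.contains lu p :=
          fun p hp => pvContainsAgree hM hgrp hp
        have hall2 : ∀ i ∈ PySem.List.pyRange 2 (PySem.Str.len key + 1), (2:Int) ≤ i :=
          fun i hi => (PySem.List.mem_pyRange_one.mp hi).1
        have hpref : pvGkoPrefLoop key used (PySem.List.pyRange 2 (PySem.Str.len key + 1))
            = pvGkoPrefLoop key lu (PySem.List.pyRange 2 (PySem.Str.len key + 1)) :=
          pvPrefLoop_congr hkey hagree _ hall2
        have hCnew : ∀ s0 : String, s0.toList.head? = some ch →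
            pvInvC (PySem.Dict.insert groups ch (n, PySem.Set.add lu s0)) := by
          intro s0 _ c1 n1 lu1 hg1
          by_cases hc : c1 = ch
          · subst hc
            rw [PySem.Dict.get?_insert_self] at hg1
            obtain ⟨rfl, rfl⟩ := Prod.mk.injEq .. ▸ (Option.some.inj hg1)
            refine ⟨hn1, hn2, ?_, ?_, ?_⟩
            · rw [PySem.Set.mem_add]
              exact Or.inl hc0lu
            · intro i h1 h2
              rw [PySem.Set.mem_add]
              exact Or.inl (hpos i h1 h2)
            · intro i h1 h2
              omega
          · rw [PySem.Dict.get?_insert_of_ne _ _ hc] at hg1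
            exact hC c1 n1 lu1 hg1
        cases hp : pvGkoPrefLoop key lu (PySem.List.pyRange 2 (PySem.Str.len key + 1)) with
        | some pre =>
          have hprehead := pvPrefLoop_head hkey _ hall2 hp
          rw [hp] at hpref
          refine ⟨?_, ?_, ?_⟩
          · simp only [pvGkoStepA, pvGkoStepB, hget, hgrp, hc0used, if_true, hnone, hlt,
              if_false, hpref, hp]
          · simp only [pvGkoStepA, pvGkoStepB, hget, hgrp, hc0used, if_true, hnone, hlt,
              if_false, hpref, hp]
            refine pvInvM_add hM ch pre hprehead n _ (fun s => ?_)
            rw [PySem.Set.mem_add]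
            simp [hgrp]
          · simp only [pvGkoStepB, hget, hgrp, hlt, if_false, hp]
            exact hCnew pre hprehead
        | none =>
          rw [hp] at hpref
          have hkeymem : PySem.Set.contains used key = PySem.Set.contains lu key :=
            hagree key hkey
          cases hku : PySem.Set.contains lu key with
          | true =>
            rw [hku] at hkeymem
            refine ⟨?_, ?_, ?_⟩
            · simp only [pvGkoStepA, pvGkoStepB, hget, hgrp, hc0used, if_true, hnone, hlt,
                if_false, hpref, hp, hkeymem, hku]
            · simp only [pvGkoStepA, pvGkoStepB, hget, hgrp, hc0used, if_true, hnone, hlt,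
                if_false, hpref, hp, hkeymem, hku]
              exact hM
            · simp only [pvGkoStepB, hget, hgrp, hlt, if_false, hp, hku]
              exact hC
          | false =>
            rw [hku] at hkeymem
            refine ⟨?_, ?_, ?_⟩
            · simp only [pvGkoStepA, pvGkoStepB, hget, hgrp, hc0used, if_true, hnone, hlt,
                if_false, hpref, hp, hkeymem, hku, Bool.false_eq_true]
            · simp only [pvGkoStepA, pvGkoStepB, hget, hgrp, hc0used, if_true, hnone, hlt,
                if_false, hpref, hp, hkeymem, hku, Bool.false_eq_true]
              refine pvInvM_add hM ch key hkey n _ (fun s => ?_)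
              rw [PySem.Set.mem_add]
              simp [hgrp]
            · simp only [pvGkoStepB, hget, hgrp, hlt, if_false, hp, hku, Bool.false_eq_true]
              exact hCnew key hkey

-- the two folds keep equal keymaps
theorem pvFold_sim : ∀ (keys : List String) (km : PySem.Dict String String)
    (used : PySem.Set String) (groups : PySem.Dict Char (Int × PySem.Set String)),
    pvInvM used groups → pvInvC groups →
    (keys.foldl pvGkoStepA (km, used)).1 = (keys.foldl pvGkoStepB (km, groups)).1 := by
  intro keys
  induction keys with
  | nil => intro km used groups _ _; rfl
  | cons key rest ih =>
    intro km used groups hM hC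
    obtain ⟨h1, h2, h3⟩ := pvStep_sim km used groups key hM hC
    rw [List.foldl_cons, List.foldl_cons,
      show pvGkoStepA (km, used) key =
        ((pvGkoStepA (km, used) key).1, (pvGkoStepA (km, used) key).2) from rfl,
      show pvGkoStepB (km, groups) key =
        ((pvGkoStepB (km, groups) key).1, (pvGkoStepB (km, groups) key).2) from rfl, h1]
    exact ih _ _ _ h2 h3

theorem pvInvM_empty : pvInvM PySem.Set.empty PySem.Dict.empty := by
  intro s
  constructor
  · intro h; cases h
  · rintro ⟨c, n, lu, hg, _, _⟩
    rw [PySem.Dict.get?_empty] at hg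
    cases hg

theorem pvInvC_empty : pvInvC PySem.Dict.empty := by
  intro c n lu hg
  rw [PySem.Dict.get?_empty] at hg
  cases hg

-- ===== VERDICT (by name: the statement is the Claim_ definition above) =====
theorem generate_keymap_optimized_spec : Claim_equal_generate_keymap_optimized := by
  intro all_keys _ _
  unfold Spec_generate_keymap_optimized generate_keymap_optimized generate_keymap_optimized_alt
  exact congrArg PySem.Dict.items
    (pvFold_sim _ PySem.Dict.empty PySem.Set.empty PySem.Dict.empty pvInvM_empty pvInvC_empty)
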